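-- pv_equiv track=rewrite | github.com/kelvinhuang0327/number-pattern-research | lottery_api/models/wheel_tables.py | _verify_coverage
-- ===== SOURCE A (Python) =====
-- from typing import List, Dict, Tuple, Optional
-- from itertools import combinations
--
-- def _verify_coverage(tickets: List[List[int]], pool: List[int],
--                       guarantee_t: int, condition_m: int) -> bool:
--     """
--     Verify coverage. For very large pools, use sampling to avoid combinatorial explosion.
--     """
--     total_combos = combinations(range(len(pool)), condition_m)
--
--     # If too many combinations, sample 10,000 to be sure
--     sample_size = 10000
--     count = 0
--
--     ticket_sets = [set(t) for t in tickets]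
--     pool_set = pool
--
--     for draw in total_combos:
--         count += 1
--         draw_set = set([pool[i] for i in draw])
--         found = False
--         for t_set in ticket_sets:
--             if len(t_set & draw_set) >= guarantee_t:
--                 found = True
--                 break
--         if not found:
--             return False
--
--         if count >= sample_size:
--             break
--
--     return True
-- ===== SOURCE B (Python) =====
-- from itertools import combinations
--
-- def _verify_coverage(tickets, pool, guarantee_t, condition_m):
--     """Precompute every t-subset occurring in some ticket once; each sampled draw
--     is then checked by testing whether some tabulated subset is contained in the
--     draw, instead of scanning all tickets and intersecting each with the draw."""
--     t = max(guarantee_t, 0)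
--     ticket_subsets = set()
--     for ticket in tickets:
--         s = sorted(set(ticket))
--         if t <= len(s):
--             ticket_subsets.update(combinations(s, t))
--     sample_size = 10000
--     count = 0
--     for draw in combinations(range(len(pool)), condition_m):
--         count += 1
--         draw_set = {pool[i] for i in draw}
--         if not any(all(v in draw_set for v in sub) for sub in ticket_subsets):
--             return False
--         if count >= sample_size:
--             break
--     return True
-- ===== Notes on version B (the rewrite author's own statement) =====
-- stated objective: alternative
-- what changed: Instead of scanning all tickets and intersecting each with every sampled draw, B precomputes once the set of all guarantee_t-subsets occurring in any ticket and checks each draw by membership of its own t-subsets in that table.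
import Mathlib
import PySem

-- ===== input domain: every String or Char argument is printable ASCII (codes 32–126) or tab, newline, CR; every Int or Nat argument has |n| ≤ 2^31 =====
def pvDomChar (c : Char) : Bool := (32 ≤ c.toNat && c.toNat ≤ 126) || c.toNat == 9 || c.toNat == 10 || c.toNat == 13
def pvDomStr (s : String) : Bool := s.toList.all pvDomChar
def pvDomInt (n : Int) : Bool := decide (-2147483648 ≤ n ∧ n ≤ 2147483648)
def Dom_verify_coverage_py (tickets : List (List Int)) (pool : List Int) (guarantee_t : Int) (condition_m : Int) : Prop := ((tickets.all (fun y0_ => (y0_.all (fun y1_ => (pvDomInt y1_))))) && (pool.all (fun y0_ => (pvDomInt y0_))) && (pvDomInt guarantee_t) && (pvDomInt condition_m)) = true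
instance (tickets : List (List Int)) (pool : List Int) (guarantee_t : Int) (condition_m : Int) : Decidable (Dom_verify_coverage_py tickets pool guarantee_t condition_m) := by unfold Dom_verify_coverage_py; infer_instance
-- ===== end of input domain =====

-- B replaces A's per-draw scan over all tickets (intersecting each with the draw) by one
-- precomputed set of all guarantee_t-subsets of the tickets; each draw is then checked by
-- containment of a tabulated subset (objective: alternative algorithm).

-- itertools.combinations(l, k) in lexicographic order (shared: both Pythons call it)
def pvCombos {α : Type} : List α → Nat → List (List α)
  | _, 0 => [[]]
  | [], _ + 1 => []
  | x :: xs, k + 1 => ((pvCombos xs k).map (fun s => x :: s)) ++ pvCombos xs (k + 1)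

-- ===== PORT A =====
def goA (pool : List Int) (tsets : List (PySem.Set Int)) (g : Int) : List (List Nat) → Nat → Bool
  | [], _ => true
  | draw :: rest, count =>
    let count' := count + 1
    let draw_set : PySem.Set Int := PySem.Set.ofList (draw.map (fun i => pool.getD i 0))
    let found := tsets.any (fun ts => decide (g ≤ ((PySem.Set.inter ts draw_set).length : Int)))
    if !found then false
    else if 10000 ≤ count' then true
    else goA pool tsets g rest count'

def verify_coverage_py (tickets : List (List Int)) (pool : List Int) (guarantee_t : Int) (condition_m : Int) : Bool :=
  let ticket_sets := tickets.map (fun t => PySem.Set.ofList t)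
  goA pool ticket_sets guarantee_t (pvCombos (List.range pool.length) condition_m.toNat) 0

-- ===== PORT B =====
def goB (pool : List Int) (tsubs : PySem.Set (List Int)) (t : Nat) : List (List Nat) → Nat → Bool
  | [], _ => true
  | draw :: rest, count =>
    let count' := count + 1
    let draw_set : PySem.Set Int := PySem.Set.ofList (draw.map (fun i => pool.getD i 0))
    if !(tsubs.any (fun sub => sub.all (fun v => PySem.Set.contains draw_set v))) then false
    else if 10000 ≤ count' then true
    else goB pool tsubs t rest count'

def buildTable (t : Nat) (tickets : List (List Int)) : PySem.Set (List Int) :=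
  tickets.foldl (fun acc tk =>
    let s := PySem.List.sorted (PySem.Set.ofList tk) (fun x => x) false
    if t ≤ s.length then PySem.Set.update acc (pvCombos s t) else acc) PySem.Set.empty

def verify_coverage_py_alt (tickets : List (List Int)) (pool : List Int) (guarantee_t : Int) (condition_m : Int) : Bool :=
  let t := (max guarantee_t 0).toNat
  goB pool (buildTable t tickets) t (pvCombos (List.range pool.length) condition_m.toNat) 0

-- ===== PRECONDITION & SPEC =====
-- Pre_ excludes only condition_m < 0, where Python A raises ValueError (combinations with negative r).
def Pre_verify_coverage_py (tickets : List (List Int)) (pool : List Int) (guarantee_t : Int) (condition_m : Int) : Prop := 0 ≤ condition_m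
instance (tickets : List (List Int)) (pool : List Int) (guarantee_t : Int) (condition_m : Int) : Decidable (Pre_verify_coverage_py tickets pool guarantee_t condition_m) := by unfold Pre_verify_coverage_py; infer_instance

def pvWitness_verify_coverage_py : List (List Int) × List Int × Int × Int := ([[1, 2]], [1, 2, 3], 2, 2)

def Spec_verify_coverage_py (tickets : List (List Int)) (pool : List Int) (guarantee_t : Int) (condition_m : Int) (out : Bool) : Prop := out = verify_coverage_py_alt tickets pool guarantee_t condition_m
instance (tickets : List (List Int)) (pool : List Int) (guarantee_t : Int) (condition_m : Int) (out : Bool) : Decidable (Spec_verify_coverage_py tickets pool guarantee_t condition_m out) := by unfold Spec_verify_coverage_py; infer_instance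

-- ===== CLAIM (what is proved, stated in full; the proofs are below) =====
def Claim_equal_verify_coverage_py : Prop := ∀ (tickets : List (List Int)) (pool : List Int) (guarantee_t : Int) (condition_m : Int), Dom_verify_coverage_py tickets pool guarantee_t condition_m → Pre_verify_coverage_py tickets pool guarantee_t condition_m → Spec_verify_coverage_py tickets pool guarantee_t condition_m (verify_coverage_py tickets pool guarantee_t condition_m)

-- ===== LEMMAS AND PROOFS =====

-- membership in pvCombos = sublists of the given length
theorem mem_pvCombos {α : Type} (l : List α) (k : Nat) (y : List α) :
    y ∈ pvCombos l k ↔ y.Sublist l ∧ y.length = k := by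
  induction l generalizing k y with
  | nil =>
    cases k with
    | zero => simp [pvCombos, List.length_eq_zero_iff]
    | succ k =>
      simp only [pvCombos, List.mem_nil_iff, false_iff, not_and]
      intro h
      rw [List.sublist_nil.mp h]
      simp
  | cons x xs ih =>
    cases k with
    | zero =>
      simp only [pvCombos, List.mem_singleton, List.length_eq_zero_iff]
      constructor
      · rintro rfl; simp
      · rintro ⟨_, rfl⟩; rfl
    | succ k =>
      simp only [pvCombos, List.mem_append, List.mem_map, ih]
      constructor
      · rintro (⟨s, ⟨hs, hl⟩, rfl⟩ | ⟨hs, hl⟩)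
        · exact ⟨List.Sublist.cons₂ x hs, by simp [hl]⟩
        · exact ⟨List.Sublist.cons x hs, hl⟩
      · rintro ⟨hs, hl⟩
        rcases List.sublist_cons_iff.mp hs with h | ⟨r, rfl, hr⟩
        · exact Or.inr ⟨h, hl⟩
        · exact Or.inl ⟨r, ⟨hr, by simpa using hl⟩, rfl⟩

-- core: the filter-length bound is equivalent to a sublist of size t all of whose elements pass
theorem core_exists (t : Nat) (sT : List Int) (p : Int → Bool) :
    t ≤ (sT.filter p).length ↔
      ∃ sub : List Int, sub.Sublist sT ∧ sub.length = t ∧ ∀ v ∈ sub, p v := by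
  constructor
  · intro h
    refine ⟨(sT.filter p).take t, (List.take_sublist _ _).trans List.filter_sublist, ?_, ?_⟩
    · simp [List.length_take]; omega
    · intro v hv
      exact (List.mem_filter.mp (List.mem_of_mem_take hv)).2
  · rintro ⟨sub, hsT, hlen, hall⟩
    have hself : sub.filter p = sub := List.filter_eq_self.mpr hall
    have hsub := hsT.filter p
    rw [hself] at hsub
    have := hsub.length_le
    omega

-- one ticket's intersection test, reformulated through the ticket's sorted t-subsets
theorem inner_iff (g : Int) (dvals tk : List Int) :
    (g ≤ ((PySem.Set.inter (PySem.Set.ofList tk) (PySem.Set.ofList dvals)).length : Int)) ↔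
      ∃ sub : List Int,
        sub.Sublist (PySem.List.sorted (PySem.Set.ofList tk) (fun x => x) false) ∧
        sub.length = (max g 0).toNat ∧
        ∀ v ∈ sub, v ∈ dvals := by
  set sT := PySem.List.sorted (PySem.Set.ofList tk) (fun x => x) false with hsT
  have hlen : (PySem.Set.inter (PySem.Set.ofList tk) (PySem.Set.ofList dvals)).length
      = (sT.filter (fun x => decide (x ∈ dvals))).length := by
    apply List.Perm.length_eq
    apply (List.perm_ext_iff_of_nodup ?_ ?_).mpr
    · intro x
      simp [PySem.Set.mem_inter, PySem.Set.mem_ofList, List.mem_filter, hsT,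
        PySem.List.mem_sorted]
    · exact PySem.Set.nodup_inter _ _ (PySem.Set.nodup_ofList tk)
    · exact (((PySem.List.sorted_perm _ _ _).nodup_iff).mpr (PySem.Set.nodup_ofList tk)).filter _
  have hcore := core_exists ((max g 0).toNat) sT (fun x => decide (x ∈ dvals))
  simp only [decide_eq_true_eq] at hcore
  rw [← hcore, ← hlen]
  omega

-- membership in the precomputed subset table
theorem mem_buildTable_aux (t : Nat) (x : List Int) :
    ∀ (tickets : List (List Int)) (acc : PySem.Set (List Int)),
      x ∈ tickets.foldl (fun acc tk =>
          let s := PySem.List.sorted (PySem.Set.ofList tk) (fun x => x) false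
          if t ≤ s.length then PySem.Set.update acc (pvCombos s t) else acc) acc ↔
        x ∈ acc ∨ ∃ tk ∈ tickets,
          x ∈ pvCombos (PySem.List.sorted (PySem.Set.ofList tk) (fun x => x) false) t := by
  intro tickets
  induction tickets with
  | nil => simp
  | cons tk rest ih =>
    intro acc
    by_cases h : t ≤ (PySem.List.sorted (PySem.Set.ofList tk) (fun x => x) false).length
    · simp only [List.foldl_cons, if_pos h, ih, PySem.Set.mem_update, List.mem_cons]
      constructor
      · rintro ((ha | hx) | ⟨tk', h1, h2⟩)
        · exact Or.inl ha
        · exact Or.inr ⟨tk, Or.inl rfl, hx⟩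
        · exact Or.inr ⟨tk', Or.inr h1, h2⟩
      · rintro (ha | ⟨tk', (rfl | h1), h2⟩)
        · exact Or.inl (Or.inl ha)
        · exact Or.inl (Or.inr h2)
        · exact Or.inr ⟨tk', h1, h2⟩
    · have hnil : x ∉ pvCombos (PySem.List.sorted (PySem.Set.ofList tk) (fun x => x) false) t := by
        intro hy
        rcases (mem_pvCombos _ _ _).mp hy with ⟨hs, hl⟩
        exact h (hl ▸ hs.length_le)
      simp only [List.foldl_cons, if_neg h, ih, List.mem_cons]
      constructor
      · rintro (ha | ⟨tk', h1, h2⟩)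
        · exact Or.inl ha
        · exact Or.inr ⟨tk', Or.inr h1, h2⟩
      · rintro (ha | ⟨tk', (rfl | h1), h2⟩)
        · exact Or.inl ha
        · exact absurd h2 hnil
        · exact Or.inr ⟨tk', h1, h2⟩

theorem mem_buildTable (t : Nat) (tickets : List (List Int)) (x : List Int) :
    x ∈ buildTable t tickets ↔
      ∃ tk ∈ tickets, x ∈ pvCombos (PySem.List.sorted (PySem.Set.ofList tk) (fun x => x) false) t := by
  unfold buildTable
  rw [mem_buildTable_aux]
  simp [PySem.Set.empty]

-- the per-draw inner checks of A and B agree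
theorem found_eq (tickets : List (List Int)) (g : Int) (dvals : List Int) :
    (tickets.map (fun tk => PySem.Set.ofList tk)).any
        (fun ts => decide (g ≤ ((PySem.Set.inter ts (PySem.Set.ofList dvals)).length : Int)))
    = (buildTable ((max g 0).toNat) tickets).any
        (fun sub => sub.all (fun v => PySem.Set.contains (PySem.Set.ofList dvals) v)) := by
  rw [Bool.eq_iff_iff]
  simp only [List.any_eq_true, List.all_eq_true, List.mem_map, PySem.Set.contains_iff,
    PySem.Set.mem_ofList, mem_buildTable, decide_eq_true_eq]
  constructor
  · rintro ⟨ts, ⟨tk, htk, rfl⟩, hg⟩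
    rcases (inner_iff g dvals tk).mp hg with ⟨sub, h1, h2, h3⟩
    exact ⟨sub, ⟨tk, htk, (mem_pvCombos _ _ _).mpr ⟨h1, h2⟩⟩, h3⟩
  · rintro ⟨sub, ⟨tk, htk, hsub⟩, hall⟩
    rcases (mem_pvCombos _ _ _).mp hsub with ⟨h1, h2⟩
    exact ⟨PySem.Set.ofList tk, ⟨tk, htk, rfl⟩, (inner_iff g dvals tk).mpr ⟨sub, h1, h2, hall⟩⟩

-- the two sampling loops agree draw by draw
theorem go_eq (pool : List Int) (tickets : List (List Int)) (g : Int)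
    (draws : List (List Nat)) (count : Nat) :
    goA pool (tickets.map (fun t => PySem.Set.ofList t)) g draws count
    = goB pool (buildTable ((max g 0).toNat) tickets) ((max g 0).toNat) draws count := by
  induction draws generalizing count with
  | nil => rfl
  | cons draw rest ih =>
    simp only [goA, goB]
    rw [← found_eq tickets g (draw.map (fun i => pool.getD i 0))]
    cases hf : (tickets.map (fun tk => PySem.Set.ofList tk)).any
        (fun ts => decide (g ≤ ((PySem.Set.inter ts (PySem.Set.ofList (draw.map (fun i => pool.getD i 0)))).length : Int))) with
    | false => simp
    | true => simp [ih]

-- ===== VERDICT (by name: the statement is the Claim_ definition above) =====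
theorem verify_coverage_py_spec : Claim_equal_verify_coverage_py := by
  intro tickets pool guarantee_t condition_m _ _
  unfold Spec_verify_coverage_py verify_coverage_py verify_coverage_py_alt
  exact go_eq pool tickets guarantee_t (pvCombos (List.range pool.length) condition_m.toNat) 0
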